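-- pv_equiv track=rewrite | github.com/TridotsTech/notificationapp | notification/notification/doctype/notification_center/notification_center.py | get_exclude_condition
-- ===== SOURCE A (Python) =====
-- def get_exclude_condition(operator):
-- 	cond = [{"operator": "sum_g", "operation": "sum", "condition": ">"},
-- 	{"operator": "sum_l", "operation": "sum", "condition": "<"},
-- 	{"operator": "sum_e", "operation": "sum", "condition": "="},
-- 	{"operator": "count_g", "operation": "count", "condition": ">"},
-- 	{"operator": "count_l", "operation": "count", "condition": "<"},
-- 	{"operator": "count_e", "operation": "count", "condition": "="},
-- 	{"operator": "average_g", "operation": "avg", "condition": ">"},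
-- 	{"operator": "average_l", "operation": "avg", "condition": "<"},
-- 	{"operator": "average_e", "operation": "avg", "condition": "="}]
-- 	for obj in cond:
-- 		if obj['operator'] == operator:
-- 			return obj
-- ===== SOURCE B (Python) =====
-- def get_exclude_condition(operator):
-- 	prefix, sep, suffix = operator.partition('_')
-- 	ops = {'sum': 'sum', 'count': 'count', 'average': 'avg'}
-- 	conds = {'g': '>', 'l': '<', 'e': '='}
-- 	if sep and prefix in ops and suffix in conds:
-- 		return {'operator': operator, 'operation': ops[prefix], 'condition': conds[suffix]}
-- ===== Notes on version B (the rewrite author's own statement) =====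
-- stated objective: simpler
-- what changed: B derives the answer by splitting the operator at its first underscore and consulting two 3-entry maps (prefix->operation, suffix->condition) instead of linearly scanning a 9-entry table of dicts.
import Mathlib
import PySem

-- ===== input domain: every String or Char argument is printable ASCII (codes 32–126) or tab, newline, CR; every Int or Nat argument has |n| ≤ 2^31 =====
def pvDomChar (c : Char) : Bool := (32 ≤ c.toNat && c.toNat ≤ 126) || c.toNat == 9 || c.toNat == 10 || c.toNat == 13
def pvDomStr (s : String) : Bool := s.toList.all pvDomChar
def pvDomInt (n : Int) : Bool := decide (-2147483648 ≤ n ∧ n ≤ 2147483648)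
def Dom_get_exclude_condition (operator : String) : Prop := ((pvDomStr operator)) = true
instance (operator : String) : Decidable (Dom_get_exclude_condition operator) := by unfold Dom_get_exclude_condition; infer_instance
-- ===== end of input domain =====

-- B replaces A's linear scan of a 9-entry table by splitting the operator at its
-- first underscore and consulting two 3-entry maps (simpler decomposition; same cost).

-- ===== PORT A =====
-- the 9-entry table, dicts as association lists in insertion order
def pvCondTable : List (List (String × String)) :=
  [[("operator", "sum_g"), ("operation", "sum"), ("condition", ">")],
   [("operator", "sum_l"), ("operation", "sum"), ("condition", "<")],
   [("operator", "sum_e"), ("operation", "sum"), ("condition", "=")],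
   [("operator", "count_g"), ("operation", "count"), ("condition", ">")],
   [("operator", "count_l"), ("operation", "count"), ("condition", "<")],
   [("operator", "count_e"), ("operation", "count"), ("condition", "=")],
   [("operator", "average_g"), ("operation", "avg"), ("condition", ">")],
   [("operator", "average_l"), ("operation", "avg"), ("condition", "<")],
   [("operator", "average_e"), ("operation", "avg"), ("condition", "=")]]

-- the 'for obj in cond: if obj['operator'] == operator: return obj' loop; fall-through = none
def pvFindLoop (cond : List (List (String × String))) (operator : String) :
    Option (List (String × String)) :=
  match cond with
  | [] => none
  | obj :: rest =>
    if PySem.Dict.get? (PySem.Dict.mk obj) "operator" = some operator then some obj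
    else pvFindLoop rest operator

def get_exclude_condition (operator : String) : Option (List (String × String)) :=
  pvFindLoop pvCondTable operator

-- ===== PORT B =====
-- hand port of str.partition('_') on the char list: exact — returns the part before
-- the first '_' and, when a '_' exists, the part after it (none = no separator found)
def pvPartitionUnderscore : List Char → List Char × Option (List Char)
  | [] => ([], none)
  | c :: rest =>
    if c = '_' then ([], some rest)
    else (c :: (pvPartitionUnderscore rest).1, (pvPartitionUnderscore rest).2)

-- ops = {'sum': 'sum', 'count': 'count', 'average': 'avg'}
def pvOpMap (p : List Char) : Option String :=
  if p = "sum".toList then some "sum"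
  else if p = "count".toList then some "count"
  else if p = "average".toList then some "avg"
  else none

-- conds = {'g': '>', 'l': '<', 'e': '='}
def pvCondMap (s : List Char) : Option String :=
  if s = "g".toList then some ">"
  else if s = "l".toList then some "<"
  else if s = "e".toList then some "="
  else none

def get_exclude_condition_alt (operator : String) : Option (List (String × String)) :=
  let (prefx, suffx?) := pvPartitionUnderscore operator.toList
  match suffx? with
  | none => none
  | some suffx =>
    match pvOpMap prefx, pvCondMap suffx with
    | some op, some cond =>
      some [("operator", operator), ("operation", op), ("condition", cond)]
    | _, _ => none

-- ===== PRECONDITION & SPEC =====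
def Spec_get_exclude_condition (operator : String) (out : Option (List (String × String))) : Prop := out = get_exclude_condition_alt operator
instance (operator : String) (out : Option (List (String × String))) : Decidable (Spec_get_exclude_condition operator out) := by unfold Spec_get_exclude_condition; infer_instance

-- ===== CLAIM (what is proved, stated in full; the proofs are below) =====
def Claim_equal_get_exclude_condition : Prop := ∀ (operator : String), Dom_get_exclude_condition operator → Spec_get_exclude_condition operator (get_exclude_condition operator)

-- ===== LEMMAS AND PROOFS =====

-- partition reconstruction: a successful split means the input was prefix ++ '_' :: suffix
set_option maxRecDepth 4000 in
theorem pvPartition_some {l p s : List Char}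
    (h : pvPartitionUnderscore l = (p, some s)) : l = p ++ '_' :: s := by
  induction l generalizing p s with
  | nil => simp [pvPartitionUnderscore] at h
  | cons c rest ih =>
    rw [show pvPartitionUnderscore (c :: rest) = if c = '_' then ([], some rest)
        else (c :: (pvPartitionUnderscore rest).1, (pvPartitionUnderscore rest).2) from rfl,
      ] at h
    by_cases hc : c = '_'
    · rw [if_pos hc, Prod.mk.injEq] at h
      obtain ⟨hp, hs⟩ := h
      cases Option.some.inj hs
      rw [← hp, hc]; rfl
    · rw [if_neg hc, Prod.mk.injEq] at h
      obtain ⟨hp, hs⟩ := h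
      have := ih (p := (pvPartitionUnderscore rest).1) (s := s) (by rw [← hs])
      rw [← hp, List.cons_append, ← this]

theorem pv_main (operator : String) :
    get_exclude_condition operator = get_exclude_condition_alt operator := by
  by_cases h1 : operator = "sum_g"; · subst h1; rfl
  by_cases h2 : operator = "sum_l"; · subst h2; rfl
  by_cases h3 : operator = "sum_e"; · subst h3; rfl
  by_cases h4 : operator = "count_g"; · subst h4; rfl
  by_cases h5 : operator = "count_l"; · subst h5; rfl
  by_cases h6 : operator = "count_e"; · subst h6; rfl
  by_cases h7 : operator = "average_g"; · subst h7; rfl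
  by_cases h8 : operator = "average_l"; · subst h8; rfl
  by_cases h9 : operator = "average_e"; · subst h9; rfl
  -- operator matches none of the 9 table entries: both sides are none
  have hA : get_exclude_condition operator = none := by
    simp [get_exclude_condition, pvCondTable, pvFindLoop, PySem.Dict.get?_mk_cons,
      Ne.symm h1, Ne.symm h2, Ne.symm h3, Ne.symm h4, Ne.symm h5, Ne.symm h6,
      Ne.symm h7, Ne.symm h8, Ne.symm h9]
  rw [hA]
  -- show B is none too: otherwise operator reconstructs to one of the 9 strings
  rcases hps : pvPartitionUnderscore operator.toList with ⟨p, s?⟩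
  cases s? with
  | none => simp [get_exclude_condition_alt, hps]
  | some sfx =>
    have hrec : operator.toList = p ++ '_' :: sfx := pvPartition_some hps
    rcases hop : pvOpMap p with _ | o
    · simp [get_exclude_condition_alt, hps, hop]
    rcases hcond : pvCondMap sfx with _ | c
    · simp [get_exclude_condition_alt, hps, hop, hcond]
    exfalso
    unfold pvOpMap at hop
    unfold pvCondMap at hcond
    split_ifs at hop with hp1 hp2 hp3 <;> split_ifs at hcond with hs1 hs2 hs3 <;>
      [ exact h1 (String.toList_inj.mp (by rw [hrec, hp1, hs1]; rfl));
        exact h2 (String.toList_inj.mp (by rw [hrec, hp1, hs2]; rfl));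
        exact h3 (String.toList_inj.mp (by rw [hrec, hp1, hs3]; rfl));
        exact h4 (String.toList_inj.mp (by rw [hrec, hp2, hs1]; rfl));
        exact h5 (String.toList_inj.mp (by rw [hrec, hp2, hs2]; rfl));
        exact h6 (String.toList_inj.mp (by rw [hrec, hp2, hs3]; rfl));
        exact h7 (String.toList_inj.mp (by rw [hrec, hp3, hs1]; rfl));
        exact h8 (String.toList_inj.mp (by rw [hrec, hp3, hs2]; rfl));
        exact h9 (String.toList_inj.mp (by rw [hrec, hp3, hs3]; rfl)) ]

-- ===== VERDICT (by name: the statement is the Claim_ definition above) =====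
theorem get_exclude_condition_spec : Claim_equal_get_exclude_condition := by
  intro operator _
  unfold Spec_get_exclude_condition
  exact pv_main operator
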